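-- pv_equiv track=rewrite | github.com/tinylabs/fan_controller | code16/fan433_modelC3.py | split_by_long_ones
-- ===== SOURCE A (Python) =====
-- from itertools import groupby
--
-- MIN_ONES_SPLIT   = 10
--
-- def rle(bits: str):
--     return [(k, len(list(g))) for k, g in groupby(bits)]
--
-- def split_by_long_ones(bits: str, min_ones: int = MIN_ONES_SPLIT):
--     runs = rle(bits)
--     segs, pos, last = [], 0, 0
--     for v, l in runs:
--         if v == '1' and l >= min_ones:
--             segs.append(bits[last:pos])
--             last = pos + l
--         pos += l
--     segs.append(bits[last:])
--     return [s for s in segs if s and s.count('1') > 0]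
-- ===== SOURCE B (Python) =====
-- MIN_ONES_SPLIT = 10
--
-- def split_by_long_ones(bits: str, min_ones: int = MIN_ONES_SPLIT):
--     # single pass over characters; no RLE, no index bookkeeping
--     n = max(min_ones, 1)
--     parts, cur, run = [], [], []
--     for c in bits:
--         if c == '1':
--             run.append(c)
--         elif len(run) >= n:
--             parts.append(''.join(cur))
--             cur = [c]
--             run = []
--         else:
--             cur.extend(run)
--             cur.append(c)
--             run = []
--     if len(run) >= n:
--         parts.append(''.join(cur))
--         cur = []
--     else:
--         cur.extend(run)
--     parts.append(''.join(cur))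
--     return [s for s in parts if s and '1' in s]
-- ===== Notes on version B (the rewrite author's own statement) =====
-- stated objective: alternative
-- what changed: Replaces A's two-phase groupby RLE plus position/last index bookkeeping with string slicing by a single direct character pass that accumulates the current segment and the pending run of '1's, flushing at each maximal long ones-run.
import Mathlib
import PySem

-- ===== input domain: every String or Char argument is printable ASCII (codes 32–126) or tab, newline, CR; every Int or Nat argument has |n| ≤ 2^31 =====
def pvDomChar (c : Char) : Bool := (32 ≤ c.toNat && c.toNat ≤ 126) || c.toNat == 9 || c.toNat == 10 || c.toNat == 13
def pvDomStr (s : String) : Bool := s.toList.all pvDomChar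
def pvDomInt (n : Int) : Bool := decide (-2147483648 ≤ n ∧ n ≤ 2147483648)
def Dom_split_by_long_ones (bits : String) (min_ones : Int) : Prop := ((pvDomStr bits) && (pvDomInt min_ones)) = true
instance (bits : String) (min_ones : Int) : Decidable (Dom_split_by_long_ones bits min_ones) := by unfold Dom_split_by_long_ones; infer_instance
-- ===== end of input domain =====

-- B replaces A's RLE + position/slice bookkeeping with one direct character pass that
-- accumulates the current segment and the pending run of '1's (objective: alternative).

-- ===== PORT A =====
-- rle(bits): itertools.groupby into (value, run-length) pairs of consecutive equal chars
def pvRle : List Char → List (Char × Nat)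
  | [] => []
  | c :: rest =>
    match pvRle rest with
    | (k, n) :: t => if k = c then (c, n + 1) :: t else (c, 1) :: (k, n) :: t
    | [] => [(c, 1)]

-- one iteration of A's loop; state = (segs, pos, last)
def pvAStep (cs : List Char) (m : Int) (st : List (List Char) × Nat × Nat) (r : Char × Nat) :
    List (List Char) × Nat × Nat :=
  if r.1 = '1' ∧ m ≤ (r.2 : Int) then
    (st.1 ++ [PySem.List.slice cs (some (st.2.2 : Int)) (some (st.2.1 : Int))],
     st.2.1 + r.2, st.2.1 + r.2)
  else (st.1, st.2.1 + r.2, st.2.2)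

-- Python's `if s and s.count('1') > 0`
def pvKeep (s : List Char) : Bool := !s.isEmpty && decide (0 < PySem.Chars.count s ['1'])

def split_by_long_ones (bits : String) (min_ones : Int) : List String :=
  let cs := bits.toList
  let runs := pvRle cs
  let st := runs.foldl (pvAStep cs min_ones) ([], 0, 0)
  let segs := st.1 ++ [PySem.List.slice cs (some ((st.2.2 : Nat) : Int)) none]
  (segs.filter pvKeep).map String.ofList

-- ===== PORT B =====
-- one iteration of B's loop; state = (parts, cur, run)
def pvBStep (n : Int) (st : List (List Char) × List Char × List Char) (c : Char) :
    List (List Char) × List Char × List Char :=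
  if c = '1' then (st.1, st.2.1, st.2.2 ++ [c])
  else if n ≤ (st.2.2.length : Int) then (st.1 ++ [st.2.1], [c], [])
  else (st.1, st.2.1 ++ st.2.2 ++ [c], [])

-- B's post-loop flush
def pvBFinal (n : Int) (st : List (List Char) × List Char × List Char) : List (List Char) :=
  if n ≤ (st.2.2.length : Int) then st.1 ++ [st.2.1] ++ [[]] else st.1 ++ [st.2.1 ++ st.2.2]

-- Python's `if s and '1' in s`
def pvKeepB (s : List Char) : Bool := !s.isEmpty && PySem.Chars.isIn ['1'] s

def split_by_long_ones_alt (bits : String) (min_ones : Int) : List String :=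
  let n := max min_ones 1
  let st := bits.toList.foldl (pvBStep n) ([], [], [])
  ((pvBFinal n st).filter pvKeepB).map String.ofList

-- ===== PRECONDITION & SPEC =====
def Spec_split_by_long_ones (bits : String) (min_ones : Int) (out : List String) : Prop := out = split_by_long_ones_alt bits min_ones
instance (bits : String) (min_ones : Int) (out : List String) : Decidable (Spec_split_by_long_ones bits min_ones out) := by unfold Spec_split_by_long_ones; infer_instance

-- ===== CLAIM (what is proved, stated in full; the proofs are below) =====
def Claim_equal_split_by_long_ones : Prop := ∀ (bits : String) (min_ones : Int), Dom_split_by_long_ones bits min_ones → Spec_split_by_long_ones bits min_ones (split_by_long_ones bits min_ones)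

-- ===== LEMMAS AND PROOFS =====

-- A's loop, with the index/slice bookkeeping replaced by the pending segment it denotes
def pvAFold (m : Int) : List (Char × Nat) → List (List Char) → List Char → List (List Char)
  | [], segs, pending => segs ++ [pending]
  | (v, l) :: rs, segs, pending =>
    if v = '1' ∧ m ≤ (l : Int) then pvAFold m rs (segs ++ [pending]) []
    else pvAFold m rs segs (pending ++ List.replicate l v)

def pvFlat (runs : List (Char × Nat)) : List Char := runs.flatMap (fun r => List.replicate r.2 r.1)

theorem pvCount_go_one : ∀ (l : List Char) (fuel acc : Nat), l.length ≤ fuel →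
    PySem.Chars.count.go ['1'] fuel l acc = acc + l.count '1'
  | [], fuel, acc, _ => by cases fuel <;> simp [PySem.Chars.count.go]
  | c :: t, fuel + 1, acc, h => by
    simp only [PySem.Chars.count.go]
    by_cases hc : c = '1'
    · subst hc
      simp [List.isPrefixOf, pvCount_go_one t fuel (acc + 1) (by simpa using h)]
      omega
    · simp [List.isPrefixOf, hc, Ne.symm hc, pvCount_go_one t fuel acc (by simpa using h)]

-- A's filter test (count('1') > 0) and B's ('1' in s) agree
theorem pvKeep_eq : pvKeep = pvKeepB := by
  funext s
  have hcount : PySem.Chars.count s ['1'] = s.count '1' := by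
    simp [PySem.Chars.count, pvCount_go_one s s.length 0 le_rfl]
  have hmem : (PySem.Chars.isIn ['1'] s) = decide ('1' ∈ s) := by
    by_cases h : '1' ∈ s
    · have hi : ['1'] <:+: s := by
        obtain ⟨u, v, rfl⟩ := List.append_of_mem h
        exact ⟨u, v, by simp⟩
      simp [h, (PySem.Chars.isIn_iff_infix _ _).mpr hi]
    · have hi : ¬ (['1'] <:+: s) := fun hi => h (by simpa using hi.sublist.mem (by simp))
      simp [h, (PySem.Chars.isIn_eq_false_iff _ _).mpr hi]
  simp [pvKeep, pvKeepB, hcount, hmem, List.count_pos_iff]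

-- the run-length encoding flattens back to the input, has positive lengths,
-- adjacent runs of distinct values, and starts with the input's first char
theorem pvRle_spec : ∀ cs : List Char,
    pvFlat (pvRle cs) = cs ∧ (∀ r ∈ pvRle cs, 1 ≤ r.2) ∧
    List.IsChain (fun a b : Char × Nat => a.1 ≠ b.1) (pvRle cs) ∧
    ((pvRle cs).head?.map Prod.fst = cs.head?) := by
  intro cs
  induction cs with
  | nil => simp [pvRle, pvFlat]
  | cons c rest ih =>
    obtain ⟨hf, hl, hc, hh⟩ := ih
    cases hrle : pvRle rest with
    | nil =>
      have : rest = [] := by rw [hrle] at hf; simpa [pvFlat] using hf.symm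
      subst this
      simp [pvRle, pvFlat]
    | cons p t =>
      obtain ⟨k, n⟩ := p
      rw [hrle] at hf hl hc hh
      by_cases hk : k = c
      · have hstep : pvRle (c :: rest) = (c, n + 1) :: t := by
          simp [pvRle, hrle, hk]
        rw [hstep]
        refine ⟨?_, ?_, ?_, by simp⟩
        · simp only [pvFlat, List.flatMap_cons] at hf ⊢
          rw [List.replicate_succ]
          rw [← hk]
          simpa [hk] using hf
        · intro r hr
          rcases List.mem_cons.mp hr with hr | hr
          · simp [hr]
          · exact hl r (by simp [hr])
        · rw [List.isChain_cons] at hc ⊢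
          refine ⟨fun y hy => ?_, hc.2⟩
          have := hc.1 y hy
          simpa [← hk] using this
      · have hstep : pvRle (c :: rest) = (c, 1) :: (k, n) :: t := by
          simp [pvRle, hrle, hk]
        rw [hstep]
        refine ⟨?_, ?_, ?_, by simp⟩
        · simp only [pvFlat, List.flatMap_cons] at hf ⊢
          simpa using hf
        · intro r hr
          rcases List.mem_cons.mp hr with hr | hr
          · simp [hr]
          · exact hl r hr
        · rw [List.isChain_cons]
          exact ⟨fun y hy => by simp at hy; rw [← hy]; exact fun h => hk h.symm, hc⟩

-- A's indexed loop over the runs computes pvAFold of the pending segment it denotes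
theorem pvAfold_eq (cs : List Char) (m : Int) :
    ∀ (runs : List (Char × Nat)) (segs : List (List Char)) (pos last : Nat),
    last ≤ pos → pvFlat runs = cs.drop pos →
    ((runs.foldl (pvAStep cs m) (segs, pos, last)).1 ++
      [PySem.List.slice cs (some (((runs.foldl (pvAStep cs m) (segs, pos, last)).2.2 : Nat) : Int)) none])
      = pvAFold m runs segs (PySem.List.slice cs (some (last : Int)) (some (pos : Int))) := by
  intro runs
  induction runs with
  | nil =>
    intro segs pos last hle hflat
    simp only [List.foldl_nil, pvAFold]
    rw [PySem.List.slice_from_natCast, PySem.List.slice_natCast]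
    have hlen : cs.length ≤ pos := by
      have := congrArg List.length hflat
      simp [pvFlat] at this
      omega
    rw [List.take_of_length_le (by simp; omega)]
  | cons r rs ih =>
    obtain ⟨v, l⟩ := r
    intro segs pos last hle hflat
    have hdrop : pvFlat rs = cs.drop (pos + l) := by
      have h1 : List.drop l (pvFlat ((v, l) :: rs)) = pvFlat rs := by
        simp [pvFlat, List.flatMap_cons, List.drop_left']
      rw [hflat] at h1
      rw [← h1, List.drop_drop]
    have hrepl : List.take l (cs.drop pos) = List.replicate l v := by
      rw [← hflat]
      simp [pvFlat, List.flatMap_cons, List.take_left']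
    simp only [List.foldl_cons, pvAFold, pvAStep]
    split_ifs with h
    · rw [ih (segs ++ [_]) (pos + l) (pos + l) le_rfl hdrop]
      congr 1
      rw [PySem.List.slice_natCast]
      simp
    · rw [ih segs (pos + l) last (by omega) hdrop]
      congr 1
      rw [PySem.List.slice_natCast, PySem.List.slice_natCast]
      have e1 : pos + l - last = (pos - last) + l := by omega
      rw [e1, List.take_add]
      congr 1
      rw [List.drop_drop]
      have e2 : last + (pos - last) = pos := by omega
      rw [e2, hrepl]

-- B's loop over a run of '1's only extends the pending run
theorem pvBfold_ones (n : Int) : ∀ (l : Nat) (st : List (List Char) × List Char × List Char),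
    (List.replicate l '1').foldl (pvBStep n) st = (st.1, st.2.1, st.2.2 ++ List.replicate l '1') := by
  intro l
  induction l with
  | zero => intro st; simp
  | succ k ih =>
    intro st
    rw [List.replicate_succ]
    simp only [List.foldl_cons, ih]
    simp [pvBStep]

theorem pvBfold_go (n : Int) (hn : 1 ≤ n) (v : Char) (hv : v ≠ '1') :
    ∀ (k : Nat) (parts : List (List Char)) (cur : List Char),
    (List.replicate k v).foldl (pvBStep n) (parts, cur, []) = (parts, cur ++ List.replicate k v, []) := by
  intro k
  induction k with
  | zero => intro parts cur; simp
  | succ j ih =>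
    intro parts cur
    rw [List.replicate_succ]
    simp only [List.foldl_cons]
    have hstep : pvBStep n (parts, cur, []) v = (parts, cur ++ [v], []) := by
      simp [pvBStep, hv]
      omega
    rw [hstep, ih]
    simp

-- B's loop over a run of non-'1's flushes the pending run at its first char
theorem pvBfold_other (n : Int) (hn : 1 ≤ n) (v : Char) (hv : v ≠ '1') :
    ∀ (l : Nat), 1 ≤ l → ∀ (st : List (List Char) × List Char × List Char),
    (List.replicate l v).foldl (pvBStep n) st =
      (if n ≤ (st.2.2.length : Int) then (st.1 ++ [st.2.1], List.replicate l v, [])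
       else (st.1, st.2.1 ++ st.2.2 ++ List.replicate l v, [])) := by
  intro l hl st
  obtain ⟨k, rfl⟩ : ∃ k, l = k + 1 := ⟨l - 1, by omega⟩
  have hstep : pvBStep n st v = if n ≤ (st.2.2.length : Int) then (st.1 ++ [st.2.1], [v], [])
      else (st.1, st.2.1 ++ st.2.2 ++ [v], []) := by
    simp [pvBStep, hv]
  rw [List.replicate_succ, List.foldl_cons, hstep]
  split_ifs with h
  · rw [pvBfold_go n hn v hv]
    simp
  · rw [pvBfold_go n hn v hv]
    simp

-- main invariant: run-level A fold = char-level B fold, synced at run boundaries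
theorem pvMain (m n : Int) (hn : n = max m 1) :
    ∀ (runs : List (Char × Nat)), (∀ r ∈ runs, 1 ≤ r.2) →
    List.IsChain (fun a b : Char × Nat => a.1 ≠ b.1) runs →
    ∀ (segs parts : List (List Char)) (cur run pending : List Char),
    ((segs = parts ∧ pending = cur ++ run ∧
        (run = [] ∨ ((run.length : Int) < n ∧ (runs.head?.map Prod.fst ≠ some '1')))) ∨
     (segs = parts ++ [cur] ∧ pending = [] ∧ n ≤ (run.length : Int) ∧
        (runs.head?.map Prod.fst ≠ some '1'))) →
    pvAFold m runs segs pending = pvBFinal n ((pvFlat runs).foldl (pvBStep n) (parts, cur, run)) := by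
  have hn1 : 1 ≤ n := by omega
  intro runs
  induction runs with
  | nil =>
    intro _ _ segs parts cur run pending hinv
    simp only [pvAFold, pvFlat, List.flatMap_nil, List.foldl_nil, pvBFinal]
    rcases hinv with ⟨hs, hp, hr⟩ | ⟨hs, hp, hr, -⟩
    · rcases hr with hr | ⟨hr, -⟩
      · subst hr; rw [if_neg (by simp; omega), hs, hp]
      · rw [if_neg (by omega), hs, hp]
    · rw [if_pos hr, hs, hp]
  | cons r rs ih =>
    obtain ⟨v, l⟩ := r
    intro hlen hchain segs parts cur run pending hinv
    have hl : 1 ≤ l := hlen (v, l) (by simp)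
    have hlen' : ∀ r ∈ rs, 1 ≤ r.2 := fun r hr => hlen r (by simp [hr])
    have hchain' : List.IsChain (fun a b : Char × Nat => a.1 ≠ b.1) rs :=
      (List.isChain_cons.mp hchain).2
    have hheadne : rs.head?.map Prod.fst ≠ some v := by
      cases hy : rs.head? with
      | none => simp
      | some y =>
        have := (List.isChain_cons.mp hchain).1 y (by simp [hy])
        simpa using fun h => this h.symm
    have hflat : pvFlat ((v, l) :: rs) = List.replicate l v ++ pvFlat rs := by
      simp [pvFlat]
    rw [hflat, List.foldl_append]
    by_cases hv : v = '1'
    · subst hv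
      rcases hinv with ⟨hs, hp, hr⟩ | ⟨-, -, -, hne⟩
      swap
      · exact absurd (by simp) hne
      have hrun : run = [] := by
        rcases hr with hr | ⟨-, hne⟩
        · exact hr
        · exact absurd (by simp) hne
      subst hrun
      rw [pvBfold_ones]
      simp only [List.nil_append]
      simp only [pvAFold]
      by_cases hm : m ≤ (l : Int)
      · rw [if_pos ⟨trivial, hm⟩]
        exact ih hlen' hchain' (segs ++ [pending]) parts cur (List.replicate l '1') []
          (Or.inr ⟨by rw [hs, hp]; simp, rfl, by simp; omega, by simpa using hheadne⟩)
      · rw [if_neg (by simpa using hm)]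
        exact ih hlen' hchain' segs parts cur (List.replicate l '1')
          (pending ++ List.replicate l '1')
          (Or.inl ⟨hs, by rw [hp]; simp, Or.inr ⟨by simp; omega, by simpa using hheadne⟩⟩)
    · have hA : ¬ (v = '1' ∧ m ≤ (l : Int)) := fun h => hv h.1
      simp only [pvAFold, if_neg hA]
      rw [pvBfold_other n hn1 v hv l hl]
      rcases hinv with ⟨hs, hp, hr⟩ | ⟨hs, hp, hr, -⟩
      · have hsmall : ¬ n ≤ (((parts, cur, run).2.2.length : Nat) : Int) := by
          rcases hr with hr | ⟨hr, -⟩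
          · subst hr; simp; omega
          · simp; omega
        rw [if_neg hsmall]
        exact ih hlen' hchain' segs parts (cur ++ run ++ List.replicate l v) []
          (pending ++ List.replicate l v)
          (Or.inl ⟨hs, by rw [hp]; simp, Or.inl rfl⟩)
      · rw [if_pos (by simpa using hr)]
        exact ih hlen' hchain' segs (parts ++ [cur]) (List.replicate l v) []
          (pending ++ List.replicate l v)
          (Or.inl ⟨by rw [hs], by rw [hp]; simp, Or.inl rfl⟩)

-- ===== VERDICT (by name: the statement is the Claim_ definition above) =====
theorem split_by_long_ones_spec : Claim_equal_split_by_long_ones := by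
  intro bits m _
  unfold Spec_split_by_long_ones split_by_long_ones split_by_long_ones_alt
  obtain ⟨hflat, hlen, hchain, -⟩ := pvRle_spec bits.toList
  have h0 : PySem.List.slice bits.toList (some ((0 : Nat) : Int)) (some ((0 : Nat) : Int)) = ([] : List Char) := by
    rw [PySem.List.slice_natCast]
    simp
  have hA := pvAfold_eq bits.toList m (pvRle bits.toList) [] 0 0 le_rfl (by rw [hflat]; simp)
  rw [h0] at hA
  have hB := pvMain m (max m 1) rfl (pvRle bits.toList) hlen hchain [] [] [] [] []
    (Or.inl ⟨rfl, rfl, Or.inl rfl⟩)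
  rw [hflat] at hB
  show ((((pvRle bits.toList).foldl (pvAStep bits.toList m) ([], 0, 0)).1 ++
      [PySem.List.slice bits.toList (some ((((pvRle bits.toList).foldl (pvAStep bits.toList m) ([], 0, 0)).2.2 : Nat) : Int)) none]).filter pvKeep).map String.ofList
    = ((pvBFinal (max m 1) (bits.toList.foldl (pvBStep (max m 1)) ([], [], []))).filter pvKeepB).map String.ofList
  rw [hA, hB, pvKeep_eq]
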